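-- pv_equiv track=rewrite | github.com/lYesterdaYl/HealthCare_App | Health_App/health_app/recommendation.py | parse_ratings_dict
-- ===== SOURCE A (Python) =====
-- def parse_ratings_dict(ratings_dict):
--     users = []
--     items = []
--     ratings = []
--     user_index = 0
--     item_index = 0
--     user_dict = dict()
--     item_dict = dict()
--
--     for item in ratings_dict:
--         item_dict[item] = item_index
--         item_index +=1
--         items.append(item)
--         for user in ratings_dict[item]:
--             if user not in user_dict:
--                 user_dict[user] = user_index
--                 user_index +=1
--                 users.append(user)
--     for i in range(len(users)):
--         ratings.append([])
--         for j in range(len(items)):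
--             ratings[i].append(None)
--     for item in ratings_dict:
--         for user in ratings_dict[item]:
--             ratings[user_dict[user]][item_dict[item]] = ratings_dict[item][user]
--     return (users,items,ratings)
-- ===== SOURCE B (Python) =====
-- def parse_ratings_dict(ratings_dict):
--     # items in dict order; users in first-encounter order; then a dense
--     # per-cell gather with dict.get (None default) instead of allocating a
--     # None grid and scattering the sparse ratings into it via index maps.
--     items = list(ratings_dict)
--     users = []
--     seen = set()
--     for row in ratings_dict.values():
--         for user in row:
--             if user not in seen:
--                 seen.add(user)
--                 users.append(user)
--     ratings = [[ratings_dict[item].get(user) for item in items] for user in users]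
--     return (users, items, ratings)
-- ===== Notes on version B (the rewrite author's own statement) =====
-- stated objective: simpler
-- what changed: B drops the user/item index dicts and the None-grid initialisation pass: it collects items and first-encounter users directly, then builds each matrix cell by a dense per-cell dict.get gather instead of scattering sparse ratings into a pre-allocated None grid.
import Mathlib
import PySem

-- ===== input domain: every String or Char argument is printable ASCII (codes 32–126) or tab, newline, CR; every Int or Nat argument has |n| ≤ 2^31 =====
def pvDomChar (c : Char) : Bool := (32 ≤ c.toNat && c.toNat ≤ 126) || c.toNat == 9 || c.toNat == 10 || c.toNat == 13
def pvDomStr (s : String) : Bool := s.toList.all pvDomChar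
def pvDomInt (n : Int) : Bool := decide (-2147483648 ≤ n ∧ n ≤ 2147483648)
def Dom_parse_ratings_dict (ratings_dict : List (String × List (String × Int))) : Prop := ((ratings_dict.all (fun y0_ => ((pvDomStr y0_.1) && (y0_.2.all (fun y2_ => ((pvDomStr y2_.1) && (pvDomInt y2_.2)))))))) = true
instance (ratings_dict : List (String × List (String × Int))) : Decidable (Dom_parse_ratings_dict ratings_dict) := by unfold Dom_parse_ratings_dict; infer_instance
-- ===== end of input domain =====

-- B drops A's user/item index dicts and the None-grid initialisation/scatter passes and instead
-- gathers each matrix cell directly by a per-cell dict lookup (objective: simpler).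


-- The Python parameter is a dict of dicts; both ports first materialise that dict
-- (insertion order, later duplicate keys overwrite in place) from the association list.
def pvDictArg (rd : List (String × List (String × Int))) : PySem.Dict String (PySem.Dict String Int) :=
  PySem.Dict.ofList (rd.map (fun p => (p.1, PySem.Dict.ofList p.2)))

-- ===== PORT A =====
-- loop state of A's first pass: users, items, user_index, item_index, user_dict, item_dict
structure PvStA where
  users : List String
  items : List String
  uIdx : Nat
  iIdx : Nat
  uD : PySem.Dict String Nat
  iD : PySem.Dict String Nat

-- body of 'for user in ratings_dict[item]: if user not in user_dict: …'
def pvAUser (st : PvStA) (u : String) : PvStA :=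
  if st.uD.contains u then st
  else { st with uD := st.uD.insert u st.uIdx, uIdx := st.uIdx + 1, users := st.users ++ [u] }

-- body of 'for item in ratings_dict: …' (first pass)
def pvAItem (st : PvStA) (pr : String × PySem.Dict String Int) : PvStA :=
  let st := { st with iD := st.iD.insert pr.1 st.iIdx, iIdx := st.iIdx + 1, items := st.items ++ [pr.1] }
  pr.2.keys.foldl pvAUser st

-- body of 'for item in ratings_dict: for user in ratings_dict[item]: ratings[…][…] = …' (third pass)
def pvAScatter (d : PySem.Dict String (PySem.Dict String Int)) (uD iD : PySem.Dict String Nat)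
    (g : List (List (Option Int))) (pr : String × PySem.Dict String Int) : List (List (Option Int)) :=
  pr.2.keys.foldl (fun g u =>
    g.set (uD.getD u 0) ((g.getD (uD.getD u 0) []).set (iD.getD pr.1 0)
      (some ((d.getD pr.1 PySem.Dict.empty).getD u 0)))) g

def parse_ratings_dict (ratings_dict : List (String × List (String × Int))) : List String × List String × List (List (Option Int)) :=
  let d := pvDictArg ratings_dict
  let st := d.items.foldl pvAItem ⟨[], [], 0, 0, PySem.Dict.empty, PySem.Dict.empty⟩
  -- second pass: the None grid
  let grid0 := (PySem.List.pyRange 0 st.users.length 1).foldl (fun rs _ =>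
    rs ++ [(PySem.List.pyRange 0 st.items.length 1).foldl (fun r _ => r ++ [(none : Option Int)]) []]) []
  let grid := d.items.foldl (pvAScatter d st.uD st.iD) grid0
  (st.users, st.items, grid)

-- ===== PORT B =====
-- body of 'for user in row: if user not in seen: …'
def pvBUser (st : List String × PySem.Set String) (u : String) : List String × PySem.Set String :=
  if st.2.contains u then st else (st.1 ++ [u], st.2.add u)

def parse_ratings_dict_alt (ratings_dict : List (String × List (String × Int))) : List String × List String × List (List (Option Int)) :=
  let d := pvDictArg ratings_dict
  let items := d.keys
  let s := d.values.foldl (fun st row => row.keys.foldl pvBUser st) ([], PySem.Set.empty)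
  let users := s.1
  (users, items, users.map (fun u => items.map (fun it => (d.getD it PySem.Dict.empty).get? u)))

-- ===== PRECONDITION & SPEC =====
def Spec_parse_ratings_dict (ratings_dict : List (String × List (String × Int))) (out : List String × List String × List (List (Option Int))) : Prop := out = parse_ratings_dict_alt ratings_dict
instance (ratings_dict : List (String × List (String × Int))) (out : List String × List String × List (List (Option Int))) : Decidable (Spec_parse_ratings_dict ratings_dict out) := by unfold Spec_parse_ratings_dict; infer_instance

-- ===== CLAIM (what is proved, stated in full; the proofs are below) =====
def Claim_equal_parse_ratings_dict : Prop := ∀ (ratings_dict : List (String × List (String × Int))), Dom_parse_ratings_dict ratings_dict → Spec_parse_ratings_dict ratings_dict (parse_ratings_dict ratings_dict)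

-- ===== LEMMAS AND PROOFS =====
-- index dict built by A's first pass: u ↦ its position
def pvIdx (us : List String) : PySem.Dict String Nat := PySem.Dict.mk us.zipIdx

-- the first-encounter accumulation both first passes perform
def pvAdd (us : List String) (ru : List String) : List String :=
  ru.foldl (fun us u => if u ∈ us then us else us ++ [u]) us

def pvUsers (L : List (String × PySem.Dict String Int)) : List String :=
  L.foldl (fun us pr => pvAdd us pr.2.keys) []

-- the matrix cell both grids are compared through
def pvCell (g : List (List (Option Int))) (p q : Nat) : Option Int := (g.getD p []).getD q none

theorem pvIdx_keys (us : List String) : (pvIdx us).keys = us := by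
  simp [pvIdx, PySem.Dict.keys]

theorem pvIdx_contains (us : List String) (u : String) : (pvIdx us).contains u = true ↔ u ∈ us := by
  rw [PySem.Dict.contains_iff_mem_keys, pvIdx_keys]

theorem pvIdx_insert (us : List String) (u : String) (h : u ∉ us) :
    (pvIdx us).insert u us.length = pvIdx (us ++ [u]) := by
  apply PySem.Dict.ext
  rw [PySem.Dict.items_insert_of_not_contains]
  · simp [pvIdx, List.zipIdx_append]
  · rcases Bool.eq_false_or_eq_true ((pvIdx us).contains u) with ht | hf
    · exact absurd ((pvIdx_contains us u).mp ht) h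
    · exact hf

theorem pvIdx_getD (us : List String) (u : String) (hn : us.Nodup) (hu : u ∈ us) :
    (pvIdx us).getD u 0 = us.idxOf u := by
  have hlt := List.idxOf_lt_length_of_mem hu
  have hmem : (u, us.idxOf u) ∈ (pvIdx us).items := by
    have : us[us.idxOf u]? = some u := by
      rw [List.getElem?_eq_getElem hlt]
      exact congrArg some (List.getElem_idxOf hlt)
    exact List.mk_mem_zipIdx_iff_getElem?.mpr this
  have hk : (pvIdx us).keys.Nodup := by rw [pvIdx_keys]; exact hn
  exact PySem.Dict.getD_of_mem_items _ hmem hk 0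

theorem pvAdd_nodup (us ru : List String) (h : us.Nodup) : (pvAdd us ru).Nodup := by
  induction ru generalizing us with
  | nil => exact h
  | cons u ru ih =>
    simp only [pvAdd, List.foldl_cons]
    by_cases hu : u ∈ us
    · rw [if_pos hu]; exact ih us h
    · rw [if_neg hu]; exact ih (us ++ [u]) (by simp [List.nodup_append, h]; intro a ha hb; exact hu (hb ▸ ha))

theorem pvAdd_mem (us ru : List String) (x : String) :
    x ∈ pvAdd us ru ↔ x ∈ us ∨ x ∈ ru := by
  induction ru generalizing us with
  | nil => simp [pvAdd]
  | cons u ru ih =>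
    simp only [pvAdd, List.foldl_cons]
    by_cases hu : u ∈ us
    · rw [if_pos hu,
        show ru.foldl (fun us u => if u ∈ us then us else us ++ [u]) us = pvAdd us ru from rfl, ih]
      simp only [List.mem_cons]
      constructor
      · tauto
      · rintro (hx | rfl | hx)
        · exact Or.inl hx
        · exact Or.inl hu
        · exact Or.inr hx
    · rw [if_neg hu,
        show ru.foldl (fun us u => if u ∈ us then us else us ++ [u]) (us ++ [u]) = pvAdd (us ++ [u]) ru from rfl, ih]
      simp only [List.mem_append, List.mem_cons]
      tauto

-- first pass accumulation from an arbitrary start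
def pvUsersFrom (us : List String) (L : List (String × PySem.Dict String Int)) : List String :=
  L.foldl (fun us pr => pvAdd us pr.2.keys) us

theorem pvA_user_fold (ru : List String) : ∀ (us its : List String) (iI : Nat) (iD : PySem.Dict String Nat),
    ru.foldl pvAUser ⟨us, its, us.length, iI, pvIdx us, iD⟩
      = ⟨pvAdd us ru, its, (pvAdd us ru).length, iI, pvIdx (pvAdd us ru), iD⟩ := by
  induction ru with
  | nil => intro us its iI iD; simp [pvAdd]
  | cons u ru ih =>
    intro us its iI iD
    simp only [List.foldl_cons, pvAUser]
    by_cases hu : u ∈ us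
    · have hc : (pvIdx us).contains u = true := (pvIdx_contains us u).mpr hu
      simp only [hc, if_true]
      rw [ih us its iI iD]
      have : pvAdd us (u :: ru) = pvAdd us ru := by
        simp only [pvAdd, List.foldl_cons, if_pos hu]
      rw [this]
    · have hc : (pvIdx us).contains u = false := by
        rcases Bool.eq_false_or_eq_true ((pvIdx us).contains u) with ht | hf
        · exact absurd ((pvIdx_contains us u).mp ht) hu
        · exact hf
      simp only [hc, Bool.false_eq_true, if_false]
      have hins : (pvIdx us).insert u us.length = pvIdx (us ++ [u]) := pvIdx_insert us u hu
      have hlen : us.length + 1 = (us ++ [u]).length := by simp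
      simp only [hins, hlen]
      rw [ih (us ++ [u]) its iI iD]
      have : pvAdd us (u :: ru) = pvAdd (us ++ [u]) ru := by
        simp only [pvAdd, List.foldl_cons, if_neg hu]
      rw [this]

theorem pvA_item_fold (L : List (String × PySem.Dict String Int)) :
    ∀ (us its : List String), (its ++ L.map Prod.fst).Nodup →
    L.foldl pvAItem ⟨us, its, us.length, its.length, pvIdx us, pvIdx its⟩
      = ⟨pvUsersFrom us L, its ++ L.map Prod.fst, (pvUsersFrom us L).length,
         (its ++ L.map Prod.fst).length, pvIdx (pvUsersFrom us L), pvIdx (its ++ L.map Prod.fst)⟩ := by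
  induction L with
  | nil => intro us its h; simp [pvUsersFrom]
  | cons pr rest ih =>
    intro us its h
    have hfresh : pr.1 ∉ its := by
      intro hmem
      exact (List.disjoint_of_nodup_append h) hmem (by simp)
    simp only [List.foldl_cons, pvAItem]
    rw [pvIdx_insert its pr.1 hfresh]
    have hlen : its.length + 1 = (its ++ [pr.1]).length := by simp
    simp only [hlen]
    rw [pvA_user_fold]
    rw [ih (pvAdd us pr.2.keys) (its ++ [pr.1]) (by simpa using h)]
    simp [pvUsersFrom, List.append_assoc]

theorem pvB_user_fold (ru : List String) : ∀ (us : List String),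
    ru.foldl pvBUser (us, (us : PySem.Set String)) = (pvAdd us ru, pvAdd us ru) := by
  induction ru with
  | nil => intro us; simp [pvAdd]
  | cons u ru ih =>
    intro us
    simp only [List.foldl_cons, pvBUser]
    by_cases hu : u ∈ us
    · have hc : PySem.Set.contains us u = true := (PySem.Set.contains_iff us u).mpr hu
      simp only [hc, if_true]
      rw [ih us]
      simp only [pvAdd, List.foldl_cons, if_pos hu]
    · have hc : PySem.Set.contains us u = false := by
        rcases Bool.eq_false_or_eq_true (PySem.Set.contains us u) with ht | hf
        · exact absurd ((PySem.Set.contains_iff us u).mp ht) hu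
        · exact hf
      simp only [hc, Bool.false_eq_true, if_false]
      rw [PySem.Set.add_of_not_mem hu, ih (us ++ [u])]
      simp only [pvAdd, List.foldl_cons, if_neg hu]

theorem pvB_outer_fold (L : List (String × PySem.Dict String Int)) : ∀ (us : List String),
    L.foldl (fun st pr => pr.2.keys.foldl pvBUser st) (us, (us : PySem.Set String))
      = (pvUsersFrom us L, pvUsersFrom us L) := by
  induction L with
  | nil => intro us; simp [pvUsersFrom]
  | cons pr rest ih =>
    intro us
    simp only [List.foldl_cons]
    rw [pvB_user_fold, ih (pvAdd us pr.2.keys)]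
    simp [pvUsersFrom]

theorem pvGrid0 (m n : Nat) :
    (PySem.List.pyRange 0 (m : Int) 1).foldl (fun rs _ =>
        rs ++ [(PySem.List.pyRange 0 (n : Int) 1).foldl (fun r _ => r ++ [(none : Option Int)]) []]) []
      = List.replicate m (List.replicate n (none : Option Int)) := by
  have hrow : (PySem.List.pyRange 0 (n : Int) 1).foldl (fun r _ => r ++ [(none : Option Int)]) []
      = List.replicate n (none : Option Int) := by
    rw [PySem.List.foldl_append_singleton_eq_map (fun _ => (none : Option Int))]
    rw [List.map_const', PySem.List.length_pyRange_one]
    simp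
  rw [hrow]
  rw [PySem.List.foldl_append_singleton_eq_map (fun _ => List.replicate n (none : Option Int))]
  rw [List.map_const', PySem.List.length_pyRange_one]
  simp

theorem pv_getD_set (g : List (List (Option Int))) (p p' : Nat) (r' : List (Option Int)) :
    (g.set p' r').getD p [] = if p' = p ∧ p' < g.length then r' else g.getD p [] := by
  rw [List.getD_eq_getElem?_getD, List.getElem?_set]
  by_cases h1 : p' = p
  · subst h1
    by_cases h2 : p' < g.length
    · simp [h2]
    · simp only [h2, and_false, if_false]
      rw [List.getD_eq_getElem?_getD, List.getElem?_eq_none (by omega)]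
      simp
  · simp only [h1, false_and, if_false]
    rw [List.getD_eq_getElem?_getD]

theorem pvRow_getD_set (r : List (Option Int)) (q c : Nat) (v : Option Int) :
    (r.set c v).getD q none = if c = q ∧ c < r.length then v else r.getD q none := by
  rw [List.getD_eq_getElem?_getD, List.getElem?_set]
  by_cases h1 : c = q
  · subst h1
    by_cases h2 : c < r.length
    · simp [h2]
    · simp only [h2, and_false, if_false]
      rw [List.getD_eq_getElem?_getD, List.getElem?_eq_none (by omega)]
      simp
  · simp only [h1, false_and, if_false]
    rw [List.getD_eq_getElem?_getD]

theorem pvInner_cell (U : List String) (hU : U.Nodup) (n c : Nat) (hc : c < n) (w : String → Option Int) :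
    ∀ (ru : List String) (g : List (List (Option Int))),
      g.length = U.length → (∀ p', p' < U.length → (g.getD p' []).length = n) → (∀ u ∈ ru, u ∈ U) →
      ∀ p q, p < U.length →
      pvCell (ru.foldl (fun g u => g.set ((pvIdx U).getD u 0)
          ((g.getD ((pvIdx U).getD u 0) []).set c (w u))) g) p q
        = if q = c ∧ U.getD p "" ∈ ru then w (U.getD p "") else pvCell g p q := by
  intro ru
  induction ru with
  | nil => intro g hg hrow hmem p q hp; simp
  | cons u ru ih =>
    intro g hg hrow hmem p q hp
    have hu : u ∈ U := hmem u (by simp)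
    have hui : (pvIdx U).getD u 0 = U.idxOf u := pvIdx_getD U u hU hu
    have huilt : U.idxOf u < U.length := List.idxOf_lt_length_of_mem hu
    have hUp : U.getD p "" = U[p] := by
      rw [List.getD_eq_getElem?_getD, List.getElem?_eq_getElem hp]; rfl
    simp only [List.foldl_cons, hui]
    set g' := g.set (U.idxOf u) ((g.getD (U.idxOf u) []).set c (w u)) with hg'
    have hlen' : g'.length = U.length := by rw [hg', List.length_set]; exact hg
    have hrow' : ∀ p', p' < U.length → (g'.getD p' []).length = n := by
      intro p' hlt
      rw [hg', pv_getD_set]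
      by_cases hcase : U.idxOf u = p' ∧ U.idxOf u < g.length
      · rw [if_pos hcase, List.length_set, hcase.1]; exact hrow _ hlt
      · rw [if_neg hcase]; exact hrow _ hlt
    have hcell : pvCell g' p q = if p = U.idxOf u ∧ q = c then w u else pvCell g p q := by
      unfold pvCell
      rw [hg', pv_getD_set]
      by_cases hp1 : U.idxOf u = p
      · rw [if_pos ⟨hp1, hg ▸ huilt⟩, pvRow_getD_set]
        have hrl : (g.getD (U.idxOf u) []).length = n := hrow _ huilt
        by_cases hq : q = c
        · rw [if_pos ⟨hq.symm, by rw [hrl]; exact hc⟩, if_pos ⟨hp1.symm, hq⟩]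
        · rw [if_neg (by tauto), if_neg (by tauto), hp1]
      · rw [if_neg (by tauto), if_neg (by tauto)]
    rw [ih g' hlen' hrow' (fun u' hu' => hmem u' (by simp [hu'])) p q hp]
    by_cases hq : q = c
    · by_cases hmem2 : U.getD p "" ∈ ru
      · rw [if_pos ⟨hq, hmem2⟩, if_pos ⟨hq, List.mem_cons.mpr (Or.inr hmem2)⟩]
      · rw [if_neg (by tauto), hcell]
        by_cases hpu : U.getD p "" = u
        · have hpidx : p = U.idxOf u := by
            rw [← hpu, hUp]
            exact (List.Nodup.idxOf_getElem hU ..).symm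
          rw [if_pos ⟨hpidx, hq⟩, if_pos ⟨hq, List.mem_cons.mpr (Or.inl hpu)⟩, hpu]
        · have h1 : ¬(p = U.idxOf u ∧ q = c) := by
            rintro ⟨h, -⟩
            apply hpu
            rw [hUp]
            have : U[p] = U[U.idxOf u]'(huilt) := by
              congr 1
            rw [this]
            exact List.getElem_idxOf huilt
          have h2 : ¬(q = c ∧ U.getD p "" ∈ u :: ru) := by
            rintro ⟨-, hm⟩
            rcases List.mem_cons.mp hm with h | h
            · exact hpu h
            · exact hmem2 h
          rw [if_neg h1, if_neg h2]
    · rw [if_neg (by tauto), hcell, if_neg (by tauto), if_neg (by tauto)]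

theorem pvInner_len (U : List String) (c : Nat) (w : String → Option Int) :
    ∀ (ru : List String) (g : List (List (Option Int))),
      (ru.foldl (fun g u => g.set ((pvIdx U).getD u 0)
        ((g.getD ((pvIdx U).getD u 0) []).set c (w u))) g).length = g.length := by
  intro ru
  induction ru with
  | nil => intro g; rfl
  | cons u ru ih => intro g; rw [List.foldl_cons, ih, List.length_set]

theorem pvInner_rowlen (U : List String) (c : Nat) (w : String → Option Int) (n m : Nat) :
    ∀ (ru : List String) (g : List (List (Option Int))),
      (∀ p', p' < m → (g.getD p' []).length = n) →
      ∀ p', p' < m → ((ru.foldl (fun g u => g.set ((pvIdx U).getD u 0)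
        ((g.getD ((pvIdx U).getD u 0) []).set c (w u))) g).getD p' []).length = n := by
  intro ru
  induction ru with
  | nil => intro g hg p' hlt; exact hg p' hlt
  | cons u ru ih =>
    intro g hg p' hlt
    rw [List.foldl_cons]
    apply ih _ _ _ hlt
    intro p'' hlt''
    rw [pv_getD_set]
    by_cases hcase : (pvIdx U).getD u 0 = p'' ∧ (pvIdx U).getD u 0 < g.length
    · rw [if_pos hcase, List.length_set, hcase.1]; exact hg _ hlt''
    · rw [if_neg hcase]; exact hg _ hlt''

theorem pvScatter_len (d : PySem.Dict String (PySem.Dict String Int)) (U I : List String)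
    (g : List (List (Option Int))) (pr : String × PySem.Dict String Int) :
    (pvAScatter d (pvIdx U) (pvIdx I) g pr).length = g.length :=
  pvInner_len U ((pvIdx I).getD pr.1 0) (fun u => some ((d.getD pr.1 PySem.Dict.empty).getD u 0)) pr.2.keys g

theorem pvScatter_rowlen (d : PySem.Dict String (PySem.Dict String Int)) (U I : List String) (n m : Nat)
    (g : List (List (Option Int))) (pr : String × PySem.Dict String Int)
    (hg : ∀ p', p' < m → (g.getD p' []).length = n) :
    ∀ p', p' < m → ((pvAScatter d (pvIdx U) (pvIdx I) g pr).getD p' []).length = n :=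
  pvInner_rowlen U ((pvIdx I).getD pr.1 0) (fun u => some ((d.getD pr.1 PySem.Dict.empty).getD u 0)) n m pr.2.keys g hg

theorem pvScatter_cell (d : PySem.Dict String (PySem.Dict String Int)) (U I : List String)
    (hU : U.Nodup) (hI : I.Nodup) (pr : String × PySem.Dict String Int) (hpr : pr.1 ∈ I)
    (g : List (List (Option Int))) (hg : g.length = U.length)
    (hrow : ∀ p', p' < U.length → (g.getD p' []).length = I.length)
    (hmemU : ∀ u ∈ pr.2.keys, u ∈ U) (p q : Nat) (hp : p < U.length) :
    pvCell (pvAScatter d (pvIdx U) (pvIdx I) g pr) p q =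
      if q = I.idxOf pr.1 ∧ U.getD p "" ∈ pr.2.keys
      then some ((d.getD pr.1 PySem.Dict.empty).getD (U.getD p "") 0) else pvCell g p q := by
  have hc : (pvIdx I).getD pr.1 0 = I.idxOf pr.1 := pvIdx_getD I pr.1 hI hpr
  have hclt : (pvIdx I).getD pr.1 0 < I.length := by
    rw [hc]; exact List.idxOf_lt_length_of_mem hpr
  have := pvInner_cell U hU I.length ((pvIdx I).getD pr.1 0) hclt
    (fun u => some ((d.getD pr.1 PySem.Dict.empty).getD u 0)) pr.2.keys g hg hrow hmemU p q hp
  rw [← hc]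
  exact this

theorem pvOuter_cell (d : PySem.Dict String (PySem.Dict String Int)) (U I : List String)
    (hU : U.Nodup) (hI : I.Nodup) :
    ∀ (L' : List (String × PySem.Dict String Int)) (g : List (List (Option Int))),
      (L'.map Prod.fst).Nodup → (∀ pr ∈ L', pr.1 ∈ I) → (∀ pr ∈ L', ∀ u ∈ pr.2.keys, u ∈ U) →
      g.length = U.length → (∀ p', p' < U.length → (g.getD p' []).length = I.length) →
      ∀ p q, p < U.length → q < I.length →
      pvCell (L'.foldl (pvAScatter d (pvIdx U) (pvIdx I)) g) p q =
        match L'.find? (fun pr => pr.1 == I.getD q "") with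
        | some pr => if U.getD p "" ∈ pr.2.keys
            then some ((d.getD pr.1 PySem.Dict.empty).getD (U.getD p "") 0) else pvCell g p q
        | none => pvCell g p q := by
  intro L'
  induction L' with
  | nil => intro g _ _ _ _ _ p q _ _; rfl
  | cons pr0 rest ih =>
    intro g hnd hinI hinU hg hrow p q hp hq
    have hIq : I.getD q "" = I[q] := by
      rw [List.getD_eq_getElem?_getD, List.getElem?_eq_getElem hq]; rfl
    have h0I : pr0.1 ∈ I := hinI pr0 (by simp)
    have h0lt : I.idxOf pr0.1 < I.length := List.idxOf_lt_length_of_mem h0I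
    have hcell1 := pvScatter_cell d U I hU hI pr0 h0I g hg hrow (hinU pr0 (by simp)) p q hp
    have hg1 : (pvAScatter d (pvIdx U) (pvIdx I) g pr0).length = U.length := by
      rw [pvScatter_len]; exact hg
    have hrow1 := pvScatter_rowlen d U I I.length U.length g pr0 hrow
    rw [List.foldl_cons]
    by_cases heq : pr0.1 = I.getD q ""
    · -- pr0 is the item of column q; the tail never writes this column again
      have hidx : I.idxOf pr0.1 = q := by
        rw [heq, hIq]; exact List.Nodup.idxOf_getElem hI ..
      have hfind : (pr0 :: rest).find? (fun pr => pr.1 == I.getD q "") = some pr0 := by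
        rw [List.find?_cons_of_pos]
        simp [heq]
      rw [hfind]
      have hrest_none : rest.find? (fun pr => pr.1 == I.getD q "") = none := by
        apply List.find?_eq_none.mpr
        intro x hx
        simp only [beq_iff_eq]
        intro hx1
        have : pr0.1 ∈ rest.map Prod.fst := by
          rw [heq, ← hx1]; exact List.mem_map_of_mem hx
        simp only [List.map_cons, List.nodup_cons] at hnd
        exact hnd.1 this
      rw [ih (pvAScatter d (pvIdx U) (pvIdx I) g pr0)
        (by simpa using hnd.of_cons) (fun pr hpr => hinI pr (by simp [hpr]))
        (fun pr hpr => hinU pr (by simp [hpr])) hg1 hrow1 p q hp hq, hrest_none]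
      rw [hcell1, hidx]
      dsimp only
      by_cases hm : U.getD p "" ∈ pr0.2.keys
      · rw [if_pos ⟨rfl, hm⟩, if_pos hm]
      · rw [if_neg (by tauto), if_neg hm]
    · -- pr0 writes a different column; the cell passes through its pass unchanged
      have hidx : I.idxOf pr0.1 ≠ q := by
        intro hcon
        apply heq
        have : I.getD q "" = pr0.1 := by
          rw [← hcon, List.getD_eq_getElem?_getD, List.getElem?_eq_getElem h0lt]
          simp [List.getElem_idxOf h0lt]
        exact this.symm
      have hpass : pvCell (pvAScatter d (pvIdx U) (pvIdx I) g pr0) p q = pvCell g p q := by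
        rw [hcell1, if_neg (by tauto)]
      have hfind : (pr0 :: rest).find? (fun pr => pr.1 == I.getD q "") =
          rest.find? (fun pr => pr.1 == I.getD q "") := by
        exact List.find?_cons_of_neg (by simp only [beq_iff_eq]; exact heq)
      rw [hfind]
      rw [ih (pvAScatter d (pvIdx U) (pvIdx I) g pr0)
        (by simpa using hnd.of_cons) (fun pr hpr => hinI pr (by simp [hpr]))
        (fun pr hpr => hinU pr (by simp [hpr])) hg1 hrow1 p q hp hq]
      cases hfind2 : rest.find? (fun pr => pr.1 == I.getD q "") with
      | none => rw [hpass]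
      | some pr =>
        dsimp only
        by_cases hm : U.getD p "" ∈ pr.2.keys
        · rw [if_pos hm, if_pos hm]
        · rw [if_neg hm, if_neg hm, hpass]

theorem pvOuter_len (d : PySem.Dict String (PySem.Dict String Int)) (U I : List String) :
    ∀ (L' : List (String × PySem.Dict String Int)) (g : List (List (Option Int))),
      (L'.foldl (pvAScatter d (pvIdx U) (pvIdx I)) g).length = g.length := by
  intro L'
  induction L' with
  | nil => intro g; rfl
  | cons pr rest ih => intro g; rw [List.foldl_cons, ih, pvScatter_len]

theorem pvOuter_rowlen (d : PySem.Dict String (PySem.Dict String Int)) (U I : List String) (n m : Nat) :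
    ∀ (L' : List (String × PySem.Dict String Int)) (g : List (List (Option Int))),
      (∀ p', p' < m → (g.getD p' []).length = n) →
      ∀ p', p' < m → ((L'.foldl (pvAScatter d (pvIdx U) (pvIdx I)) g).getD p' []).length = n := by
  intro L'
  induction L' with
  | nil => intro g hg p' hlt; exact hg p' hlt
  | cons pr rest ih =>
    intro g hg p' hlt
    rw [List.foldl_cons]
    exact ih _ (pvScatter_rowlen d U I n m g pr hg) p' hlt

theorem pvUsersFrom_mem (L : List (String × PySem.Dict String Int)) :
    ∀ (us : List String) (x : String),
      x ∈ pvUsersFrom us L ↔ x ∈ us ∨ ∃ pr ∈ L, x ∈ pr.2.keys := by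
  induction L with
  | nil => intro us x; simp [pvUsersFrom]
  | cons pr rest ih =>
    intro us x
    simp only [pvUsersFrom, List.foldl_cons]
    rw [show rest.foldl (fun us pr => pvAdd us pr.2.keys) (pvAdd us pr.2.keys)
        = pvUsersFrom (pvAdd us pr.2.keys) rest from rfl, ih, pvAdd_mem]
    constructor
    · rintro ((h | h) | ⟨pr', hpr', h⟩)
      · exact Or.inl h
      · exact Or.inr ⟨pr, by simp, h⟩
      · exact Or.inr ⟨pr', by simp [hpr'], h⟩
    · rintro (h | ⟨pr', hpr', h⟩)
      · exact Or.inl (Or.inl h)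
      · rcases List.mem_cons.mp hpr' with rfl | hpr'
        · exact Or.inl (Or.inr h)
        · exact Or.inr ⟨pr', hpr', h⟩

theorem pvUsersFrom_nodup (L : List (String × PySem.Dict String Int)) :
    ∀ (us : List String), us.Nodup → (pvUsersFrom us L).Nodup := by
  induction L with
  | nil => intro us h; exact h
  | cons pr rest ih =>
    intro us h
    exact ih (pvAdd us pr.2.keys) (pvAdd_nodup us pr.2.keys h)

theorem pvGet?_eq (row : PySem.Dict String Int) (u : String) :
    row.get? u = if u ∈ row.keys then some (row.getD u 0) else none := by
  cases h : row.get? u with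
  | none => rw [if_neg ((PySem.Dict.get?_eq_none_iff_not_mem_keys row u).mp h)]
  | some v =>
    have hu : u ∈ row.keys :=
      PySem.Dict.mem_keys_of_mem_items row (PySem.Dict.mem_items_of_get?_eq_some row h)
    rw [if_pos hu, PySem.Dict.getD_eq_get?_getD, h]
    rfl

theorem pvCell_replicate (m n : Nat) (p q : Nat) :
    pvCell (List.replicate m (List.replicate n (none : Option Int))) p q = none := by
  unfold pvCell
  by_cases hp : p < m
  · rw [List.getD_replicate _ hp]
    by_cases hq : q < n
    · rw [List.getD_replicate _ hq]
    · have h0 : (List.replicate n (none : Option Int))[q]? = none := by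
        rw [List.getElem?_eq_none (by simp; omega)]
      rw [List.getD_eq_getElem?_getD, h0]
      rfl
  · have h0 : (List.replicate m (List.replicate n (none : Option Int))).getD p [] = [] := by
      have : (List.replicate m (List.replicate n (none : Option Int)))[p]? = none := by
        rw [List.getElem?_eq_none (by simp; omega)]
      rw [List.getD_eq_getElem?_getD, this]
      rfl
    rw [h0]
    rfl

theorem pvA_eval (rd : List (String × List (String × Int))) :
    parse_ratings_dict rd =
      (pvUsersFrom [] (pvDictArg rd).items,
       ((pvDictArg rd).items).map Prod.fst,
       ((pvDictArg rd).items).foldl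
         (pvAScatter (pvDictArg rd) (pvIdx (pvUsersFrom [] (pvDictArg rd).items))
           (pvIdx (((pvDictArg rd).items).map Prod.fst)))
         (List.replicate (pvUsersFrom [] (pvDictArg rd).items).length
           (List.replicate (((pvDictArg rd).items).map Prod.fst).length (none : Option Int)))) := by
  unfold parse_ratings_dict
  dsimp only
  have hK : (pvDictArg rd).keys.Nodup := PySem.Dict.nodup_keys_ofList _
  rw [show (⟨[], [], 0, 0, PySem.Dict.empty, PySem.Dict.empty⟩ : PvStA)
      = ⟨[], [], ([] : List String).length, ([] : List String).length, pvIdx [], pvIdx []⟩ from rfl]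
  rw [pvA_item_fold _ [] [] (by simpa using hK)]
  dsimp only
  rw [List.nil_append, pvGrid0]

theorem pvB_eval (rd : List (String × List (String × Int))) :
    parse_ratings_dict_alt rd =
      (pvUsersFrom [] (pvDictArg rd).items,
       ((pvDictArg rd).items).map Prod.fst,
       (pvUsersFrom [] (pvDictArg rd).items).map (fun u =>
         (((pvDictArg rd).items).map Prod.fst).map (fun it =>
           ((pvDictArg rd).getD it PySem.Dict.empty).get? u))) := by
  unfold parse_ratings_dict_alt
  dsimp only
  rw [show (pvDictArg rd).values = ((pvDictArg rd).items).map (fun x => x.2) from rfl,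
    List.foldl_map]
  rw [show (([], PySem.Set.empty) : List String × PySem.Set String)
      = (([] : List String), (([] : List String) : PySem.Set String)) from rfl]
  rw [show ((pvDictArg rd).items).foldl (fun st x => x.2.keys.foldl pvBUser st)
        (([] : List String), (([] : List String) : PySem.Set String))
      = (pvUsersFrom [] (pvDictArg rd).items, pvUsersFrom [] (pvDictArg rd).items)
    from pvB_outer_fold _ []]
  rfl

theorem pvGrid_eq (rd : List (String × List (String × Int))) :
    ((pvDictArg rd).items).foldl
      (pvAScatter (pvDictArg rd) (pvIdx (pvUsersFrom [] (pvDictArg rd).items))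
        (pvIdx (((pvDictArg rd).items).map Prod.fst)))
      (List.replicate (pvUsersFrom [] (pvDictArg rd).items).length
        (List.replicate (((pvDictArg rd).items).map Prod.fst).length (none : Option Int)))
    = (pvUsersFrom [] (pvDictArg rd).items).map (fun u =>
        (((pvDictArg rd).items).map Prod.fst).map (fun it =>
          ((pvDictArg rd).getD it PySem.Dict.empty).get? u)) := by
  set d := pvDictArg rd with hd
  set L := d.items with hLdef
  set I := L.map Prod.fst with hIdef
  set U := pvUsersFrom [] L with hUdef
  have hK : d.keys.Nodup := PySem.Dict.nodup_keys_ofList _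
  have hI : I.Nodup := hK
  have hU : U.Nodup := pvUsersFrom_nodup L [] List.nodup_nil
  have hUmem : ∀ pr ∈ L, ∀ u ∈ pr.2.keys, u ∈ U := by
    intro pr hpr u hu
    exact (pvUsersFrom_mem L [] u).mpr (Or.inr ⟨pr, hpr, hu⟩)
  have hImem : ∀ pr ∈ L, pr.1 ∈ I := by
    intro pr hpr
    exact List.mem_map_of_mem hpr
  set g0 := List.replicate U.length (List.replicate I.length (none : Option Int)) with hg0def
  have hg0len : g0.length = U.length := List.length_replicate
  have hg0row : ∀ p', p' < U.length → (g0.getD p' []).length = I.length := by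
    intro p' hlt
    rw [hg0def, List.getD_replicate _ hlt, List.length_replicate]
  have hlen : (L.foldl (pvAScatter d (pvIdx U) (pvIdx I)) g0).length = U.length := by
    rw [pvOuter_len]; exact hg0len
  have hrowlen : ∀ p', p' < U.length →
      ((L.foldl (pvAScatter d (pvIdx U) (pvIdx I)) g0).getD p' []).length = I.length :=
    pvOuter_rowlen d U I I.length U.length L g0 hg0row
  apply List.ext_getElem
  · rw [hlen, List.length_map]
  intro p h1 h2
  rw [List.getElem_map]
  have hp : p < U.length := by rw [hlen] at h1; exact h1
  have hrowp :
      (L.foldl (pvAScatter d (pvIdx U) (pvIdx I)) g0).getD p []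
        = (L.foldl (pvAScatter d (pvIdx U) (pvIdx I)) g0)[p] := by
    rw [List.getD_eq_getElem?_getD, List.getElem?_eq_getElem h1]
    rfl
  apply List.ext_getElem
  · rw [← hrowp, hrowlen p hp]; simp [hIdef]
  intro q hq1 hq2
  have hq : q < I.length := by
    rw [← hrowp, hrowlen p hp] at hq1; exact hq1
  rw [List.getElem_map]
  have hUp : U.getD p "" = U[p] := by
    rw [List.getD_eq_getElem?_getD, List.getElem?_eq_getElem hp]; rfl
  have hIq : I.getD q "" = I[q] := by
    rw [List.getD_eq_getElem?_getD, List.getElem?_eq_getElem hq]; rfl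
  have hcell2 : pvCell (L.foldl (pvAScatter d (pvIdx U) (pvIdx I)) g0) p q
      = (L.foldl (pvAScatter d (pvIdx U) (pvIdx I)) g0)[p][q] := by
    unfold pvCell
    rw [hrowp, List.getD_eq_getElem?_getD, List.getElem?_eq_getElem hq1]
    rfl
  rw [← hcell2]
  rw [pvOuter_cell d U I hU hI L g0 hI hImem hUmem hg0len hg0row p q hp hq]
  have hcellg0 : pvCell g0 p q = none := by
    rw [hg0def]; exact pvCell_replicate U.length I.length p q
  cases hfind : L.find? (fun pr => pr.1 == I.getD q "") with
  | none =>
    exfalso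
    have hmemIq : I[q] ∈ L.map Prod.fst := List.getElem_mem hq
    rcases List.mem_map.mp hmemIq with ⟨pr, hpr, hpr1⟩
    have hnone := List.find?_eq_none.mp hfind pr hpr
    simp only [beq_iff_eq] at hnone
    exact hnone (by rw [hpr1, hIq])
  | some pr =>
    have hfs : pr.1 = I.getD q "" := by
      have hfs' := List.find?_some hfind
      simpa using hfs'
    have hmem : pr ∈ L := List.mem_of_find?_eq_some hfind
    have hdg : d.getD pr.1 PySem.Dict.empty = pr.2 := by
      rw [PySem.Dict.getD_eq_get?_getD,
        PySem.Dict.get?_of_mem_items d (show (pr.1, pr.2) ∈ d.items by simpa using hmem) hK]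
      rfl
    have hrhs : (d.getD I[q] PySem.Dict.empty).get? U[p] = pr.2.get? U[p] := by
      rw [← hIq, ← hfs, hdg]
    rw [hrhs, pvGet?_eq pr.2 (U[p]'hp)]
    dsimp only
    by_cases hm : U.getD p "" ∈ pr.2.keys
    · rw [if_pos hm, if_pos (show U[p] ∈ pr.2.keys from hUp ▸ hm), hdg, hUp]
    · rw [if_neg hm, if_neg (show U[p] ∉ pr.2.keys from hUp ▸ hm), hcellg0]

-- ===== VERDICT (by name: the statement is the Claim_ definition above) =====
theorem parse_ratings_dict_spec : Claim_equal_parse_ratings_dict := by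
  intro rd _
  unfold Spec_parse_ratings_dict
  rw [pvA_eval, pvB_eval, pvGrid_eq]
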